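-- pv_equiv track=rewrite | github.com/ravish-oo/opoch-toe-arcagi | src/arcbit/kernel/ops.py | pose_plane
-- ===== SOURCE A (Python) =====
-- _POSE_IDS = ["I", "R90", "R180", "R270", "FX", "FXR90", "FXR180", "FXR270"]
--
-- def pose_plane(plane: list[int], pid: str, H: int, W: int) -> tuple[list[int], int, int]:
--     """
--     Apply one of 8 D4 transforms by coordinate remap.
--
--     Args:
--         plane: List of H row masks.
--         pid: Pose ID ∈ {"I","R90","R180","R270","FX","FXR90","FXR180","FXR270"}.
--         H: Source height.
--         W: Source width.
--
--     Returns: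
--         tuple[list[int], int, int]: (plane', H', W')
--
--     Spec:
--         WO-01 section 4: POSE.
--
--         Output shape:
--           If pid ∈ {R90, R270, FXR90, FXR270}: (H', W') = (W, H) (swap)
--           Else: (H', W') = (H, W)
--
--         Exact pull mapping (dest ← src):
--           I:      r=r',           c=c'
--           R90:    r=H-1-c',       c=r'
--           R180:   r=H-1-r',       c=W-1-c'
--           R270:   r=c',           c=W-1-r'
--           FX:     r=r',           c=W-1-c'
--           FXR90:  r=H-1-c',       c=W-1-r'
--           FXR180: r=H-1-r',       c=c'
--           FXR270: r=c',           c=r'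
--
--     Raises:
--         ValueError: If pid is invalid.
--
--     Invariant:
--         pose(pose(plane, pid), inv(pid)) == plane (bit-for-bit).
--     """
--     if pid not in _POSE_IDS:
--         raise ValueError(f"Invalid pose ID: '{pid}'. Must be one of {_POSE_IDS}")
--
--     # Determine output shape
--     if pid in {"R90", "R270", "FXR90", "FXR270"}:
--         H_out, W_out = W, H
--     else:
--         H_out, W_out = H, W
--
--     # Build output plane
--     plane_out = []
--     for r_out in range(H_out):
--         mask_out = 0
--         for c_out in range(W_out):
--             # Compute source (r, c) using pull mapping
--             if pid == "I":
--                 r, c = r_out, c_out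
--             elif pid == "R90":
--                 r, c = H - 1 - c_out, r_out
--             elif pid == "R180":
--                 r, c = H - 1 - r_out, W - 1 - c_out
--             elif pid == "R270":
--                 r, c = c_out, W - 1 - r_out
--             elif pid == "FX":
--                 r, c = r_out, W - 1 - c_out
--             elif pid == "FXR90":
--                 r, c = H - 1 - c_out, W - 1 - r_out
--             elif pid == "FXR180":
--                 r, c = H - 1 - r_out, c_out
--             elif pid == "FXR270":
--                 r, c = c_out, r_out
--             else:
--                 raise ValueError(f"Unhandled pose ID: '{pid}'")
--
--             # If source is in bounds and bit is set, set output bit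
--             if 0 <= r < H and 0 <= c < W:
--                 if (plane[r] >> c) & 1:
--                     mask_out |= (1 << c_out)
--
--         plane_out.append(mask_out)
--
--     return (plane_out, H_out, W_out)
-- ===== SOURCE B (Python) =====
-- _POSE_IDS = ["I", "R90", "R180", "R270", "FX", "FXR90", "FXR180", "FXR270"]
--
--
-- def pose_plane(plane: list[int], pid: str, H: int, W: int) -> tuple[list[int], int, int]:
--     """Scatter/push formulation: walk the SOURCE cells once and push each set
--     bit to its destination via the forward D4 map (the inverse of the pull map).
--     The forward map is a bijection of the grid, so each destination bit is
--     written at most once and `+=` suffices to set it."""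
--     if pid not in _POSE_IDS:
--         raise ValueError(f"Invalid pose ID: '{pid}'. Must be one of {_POSE_IDS}")
--
--     swap = pid in {"R90", "R270", "FXR90", "FXR270"}
--     H_out, W_out = (W, H) if swap else (H, W)
--
--     plane_out = [0] * H_out
--     for r in range(H):
--         row = plane[r]
--         for c in range(W):
--             if (row >> c) & 1:
--                 # forward map (r, c) -> (ro, co): inverse of the pull mapping
--                 if pid == "I":
--                     ro, co = r, c
--                 elif pid == "R90":
--                     ro, co = c, H - 1 - r
--                 elif pid == "R180":
--                     ro, co = H - 1 - r, W - 1 - c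
--                 elif pid == "R270":
--                     ro, co = W - 1 - c, r
--                 elif pid == "FX":
--                     ro, co = r, W - 1 - c
--                 elif pid == "FXR90":
--                     ro, co = W - 1 - c, H - 1 - r
--                 elif pid == "FXR180":
--                     ro, co = H - 1 - r, c
--                 else:  # FXR270
--                     ro, co = c, r
--                 plane_out[ro] += 1 << co
--
--     return (plane_out, H_out, W_out)
-- ===== Notes on version B (the rewrite author's own statement) =====
-- stated objective: alternative
-- what changed: B replaces A's gather/pull double loop over the OUTPUT grid (recomputing the source cell of every output bit, set or not) by a single scatter/push pass over the SOURCE cells that writes each set bit to its destination row via the inverse (forward) D4 map.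
-- outside the precondition, e.g. on pose_plane([], 'I', 1, 0): A returns ([0], 1, 0), B raises IndexError
import Mathlib
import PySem

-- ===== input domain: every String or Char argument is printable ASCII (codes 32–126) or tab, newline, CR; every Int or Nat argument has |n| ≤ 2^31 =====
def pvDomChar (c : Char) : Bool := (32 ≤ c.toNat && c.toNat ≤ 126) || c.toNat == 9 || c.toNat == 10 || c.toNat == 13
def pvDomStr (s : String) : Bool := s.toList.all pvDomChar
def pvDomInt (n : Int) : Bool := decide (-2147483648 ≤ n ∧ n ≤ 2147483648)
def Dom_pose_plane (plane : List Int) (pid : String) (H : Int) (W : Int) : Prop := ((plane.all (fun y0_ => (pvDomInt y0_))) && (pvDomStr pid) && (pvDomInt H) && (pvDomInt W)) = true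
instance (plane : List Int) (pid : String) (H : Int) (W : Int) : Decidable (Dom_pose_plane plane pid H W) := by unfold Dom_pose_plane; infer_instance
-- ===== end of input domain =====

-- B is an ALTERNATIVE formulation: a scatter/push pass over the source cells via the
-- forward D4 map instead of A's gather/pull double loop over the output grid (same cost).

-- ===== PORT A =====
def pvPoseIds : List String := ["I", "R90", "R180", "R270", "FX", "FXR90", "FXR180", "FXR270"]

-- Python's `(x >> c) & 1`, used identically by both programs; exact for 0 ≤ c
def pvBit (x : Int) (c : Int) : Int := PySem.Int.band (x >>> c.toNat) 1

def pose_plane (plane : List Int) (pid : String) (H : Int) (W : Int) : List Int × Int × Int :=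
  if pid ∈ pvPoseIds then
    -- output shape
    let HW := if pid ∈ (["R90", "R270", "FXR90", "FXR270"] : List String) then (W, H) else (H, W)
    let H_out := HW.1
    let W_out := HW.2
    let plane_out := (PySem.List.pyRange 0 H_out 1).foldl (fun plane_out r_out =>
      let mask_out : Int := (PySem.List.pyRange 0 W_out 1).foldl (fun mask_out c_out =>
        -- source (r, c) by pull mapping
        let rc : Int × Int :=
          if pid = "I" then (r_out, c_out)
          else if pid = "R90" then (H - 1 - c_out, r_out)
          else if pid = "R180" then (H - 1 - r_out, W - 1 - c_out)
          else if pid = "R270" then (c_out, W - 1 - r_out)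
          else if pid = "FX" then (r_out, W - 1 - c_out)
          else if pid = "FXR90" then (H - 1 - c_out, W - 1 - r_out)
          else if pid = "FXR180" then (H - 1 - r_out, c_out)
          else (c_out, r_out)  -- pid = "FXR270"; the trailing 'raise' is unreachable (pid ∈ pvPoseIds)
        if (0 ≤ rc.1 ∧ rc.1 < H) ∧ (0 ≤ rc.2 ∧ rc.2 < W) then
          if pvBit (PySem.List.pyGetD plane rc.1 0) rc.2 ≠ 0 then   -- (plane[r] >> c) & 1
            PySem.Int.bor mask_out ((1 : Int) <<< c_out.toNat)   -- mask_out |= 1 << c_out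
          else mask_out
        else mask_out) 0
      plane_out ++ [mask_out]) []
    (plane_out, H_out, W_out)
  else ([], 0, 0)  -- ValueError: outside Pre_

-- ===== PORT B =====
def pose_plane_alt (plane : List Int) (pid : String) (H : Int) (W : Int) : List Int × Int × Int :=
  if pid ∈ pvPoseIds then
    let swap := pid ∈ (["R90", "R270", "FXR90", "FXR270"] : List String)
    let HW := if swap then (W, H) else (H, W)
    let H_out := HW.1
    let W_out := HW.2
    let init := PySem.List.pyRepeat [(0 : Int)] H_out   -- [0] * H_out
    let plane_out := (PySem.List.pyRange 0 H 1).foldl (fun po r =>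
      let row := PySem.List.pyGetD plane r 0   -- plane[r]; in range under Pre_
      (PySem.List.pyRange 0 W 1).foldl (fun po c =>
        if pvBit row c ≠ 0 then   -- (row >> c) & 1 ; c ≥ 0
          -- forward map (r, c) -> (ro, co): inverse of the pull mapping
          let rc : Int × Int :=
            if pid = "I" then (r, c)
            else if pid = "R90" then (c, H - 1 - r)
            else if pid = "R180" then (H - 1 - r, W - 1 - c)
            else if pid = "R270" then (W - 1 - c, r)
            else if pid = "FX" then (r, W - 1 - c)
            else if pid = "FXR90" then (W - 1 - c, H - 1 - r)
            else if pid = "FXR180" then (H - 1 - r, c)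
            else (c, r)  -- pid = "FXR270"
          -- plane_out[ro] += 1 << co  (ro, co always in range here)
          PySem.List.pySetD po rc.1 (PySem.List.pyGetD po rc.1 0 + ((1 : Int) <<< rc.2.toNat))
        else po) po) init
    (plane_out, H_out, W_out)
  else ([], 0, 0)  -- ValueError: outside Pre_

-- ===== PRECONDITION & SPEC =====
-- Pre_ excludes invalid pose ids (Python A raises ValueError) and planes with fewer than H rows
-- when H > 0 (A raises IndexError there whenever W > 0; B reads the first H source rows
-- unconditionally and raises IndexError there even when W ≤ 0).
def Pre_pose_plane (plane : List Int) (pid : String) (H : Int) (W : Int) : Prop :=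
  pid ∈ pvPoseIds ∧ (H ≤ (plane.length : Int) ∨ H ≤ 0)
instance (plane : List Int) (pid : String) (H : Int) (W : Int) : Decidable (Pre_pose_plane plane pid H W) := by unfold Pre_pose_plane; infer_instance

def pvWitness_pose_plane : List Int × String × Int × Int := ([1, 2], "R90", 2, 2)

def Spec_pose_plane (plane : List Int) (pid : String) (H : Int) (W : Int) (out : List Int × Int × Int) : Prop := out = pose_plane_alt plane pid H W
instance (plane : List Int) (pid : String) (H : Int) (W : Int) (out : List Int × Int × Int) : Decidable (Spec_pose_plane plane pid H W out) := by unfold Spec_pose_plane; infer_instance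

-- ===== CLAIM (what is proved, stated in full; the proofs are below) =====
def Claim_equal_pose_plane : Prop := ∀ (plane : List Int) (pid : String) (H : Int) (W : Int), Dom_pose_plane plane pid H W → Pre_pose_plane plane pid H W → Spec_pose_plane plane pid H W (pose_plane plane pid H W)

-- ===== LEMMAS AND PROOFS =====

-- fold that appends one element per index is a map
theorem pvFoldlAppend {α β : Type} (l : List α) (f : α → β) (init : List β) :
    l.foldl (fun acc x => acc ++ [f x]) init = init ++ l.map f := by
  induction l generalizing init with
  | nil => simp
  | cons x xs ih => simp [List.foldl_cons, ih]

-- nested fold over two lists = fold over the flattened pair list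
theorem pvFoldlNested {α : Type} (l1 l2 : List Int) (g : α → Int → Int → α) (init : α) :
    l1.foldl (fun acc x => l2.foldl (fun acc y => g acc x y) acc) init
      = (l1.flatMap (fun x => l2.map (fun y => (x, y)))).foldl (fun acc p => g acc p.1 p.2) init := by
  induction l1 generalizing init with
  | nil => simp
  | cons x xs ih => simp [List.foldl_cons, List.foldl_append, List.foldl_map, ih]

-- disjoint bits add (Nat)
theorem pvNatLorPow (a n : Nat) (h : a < 2 ^ n) : a ||| 2 ^ n = a + 2 ^ n := by
  apply Nat.eq_of_testBit_eq
  intro k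
  rw [Nat.testBit_lor]
  rcases lt_trichotomy k n with hk | rfl | hk
  · rw [Nat.testBit_two_pow_of_ne (by omega : n ≠ k)]
    simp only [Nat.testBit_eq_decide_div_mod_eq, Bool.or_false]
    have h2 : (2 : Nat) ^ n = 2 * 2 ^ (n - k - 1) * 2 ^ k := by
      rw [← pow_succ', ← pow_add]; congr 1; omega
    have h3 : (a + 2 ^ n) / 2 ^ k = a / 2 ^ k + 2 * 2 ^ (n - k - 1) := by
      rw [h2, Nat.add_mul_div_right _ _ (Nat.two_pow_pos k)]
    rw [h3]
    have h4 : (a / 2 ^ k + 2 * 2 ^ (n - k - 1)) % 2 = a / 2 ^ k % 2 := by omega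
    rw [h4]
  · rw [Nat.testBit_two_pow_self]
    have h1 : a.testBit k = false := Nat.testBit_lt_two_pow h
    rw [h1]
    simp only [Nat.testBit_eq_decide_div_mod_eq]
    have h5 : (a + 2 ^ k) / 2 ^ k = 1 := by
      rw [Nat.add_div_right _ (Nat.two_pow_pos k), Nat.div_eq_of_lt h]
    rw [h5]
    simp
  · rw [Nat.testBit_two_pow_of_ne (by omega : n ≠ k)]
    have h1 : a.testBit k = false :=
      Nat.testBit_lt_two_pow (lt_of_lt_of_le h (Nat.pow_le_pow_right (by norm_num) (by omega)))
    have h2 : (a + 2 ^ n).testBit k = false := by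
      apply Nat.testBit_lt_two_pow
      calc a + 2 ^ n < 2 ^ n + 2 ^ n := by omega
        _ = 2 ^ (n + 1) := by ring
        _ ≤ 2 ^ k := Nat.pow_le_pow_right (by norm_num) (by omega)
    rw [h1, h2]
    simp

-- disjoint bits add (Int, as A's `mask |= 1 << c` produces them)
theorem pvBorEqAdd (m : Int) (n : Nat) (h0 : 0 ≤ m) (h1 : m < 2 ^ n) :
    PySem.Int.bor m ((1 : Int) <<< n) = m + (1 : Int) <<< n := by
  have hs : (1 : Int) <<< n = 2 ^ n := by simp [Int.shiftLeft_eq]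
  have hpow : ((2 : Int) ^ n) = ((2 ^ n : Nat) : Int) := by push_cast; ring
  rw [hs, PySem.Int.bor_of_nonneg h0 (by positivity)]
  have ht : ((2 : Int) ^ n).toNat = 2 ^ n := by rw [hpow]; exact Int.toNat_natCast _
  rw [ht, pvNatLorPow m.toNat n (by omega)]
  push_cast
  omega

-- the scatter loop preserves the length of the accumulator
theorem pvScatterLen (β : Int → Int → Prop) [inst : ∀ r c, Decidable (β r c)]
    (f1 f2 : Int → Int → Int) (ps : List (Int × Int)) (po : List Int) :
    (ps.foldl (fun po p =>
        if β p.1 p.2 then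
          PySem.List.pySetD po (f1 p.1 p.2)
            (PySem.List.pyGetD po (f1 p.1 p.2) 0 + (1 : Int) <<< (f2 p.1 p.2).toNat)
        else po) po).length = po.length := by
  induction ps generalizing po with
  | nil => rfl
  | cons p ps ih =>
    rw [List.foldl_cons, ih]
    split
    · exact PySem.List.length_pySetD _ _ _
    · rfl

-- cell-level characterisation of the scatter loop: entry k accumulates exactly the
-- contributions of the pairs pushed to row k
theorem pvScatterGetD (β : Int → Int → Prop) [inst : ∀ r c, Decidable (β r c)]
    (f1 f2 : Int → Int → Int) (N : Nat) (ps : List (Int × Int)) (po : List Int)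
    (hpo : po.length = N) (k : Nat) (hk : k < N)
    (hin : ∀ p ∈ ps, 0 ≤ f1 p.1 p.2 ∧ f1 p.1 p.2 < (N : Int)) :
    (ps.foldl (fun po p =>
        if β p.1 p.2 then
          PySem.List.pySetD po (f1 p.1 p.2)
            (PySem.List.pyGetD po (f1 p.1 p.2) 0 + (1 : Int) <<< (f2 p.1 p.2).toNat)
        else po) po).getD k 0
      = po.getD k 0 + (ps.map (fun p =>
          if β p.1 p.2 ∧ f1 p.1 p.2 = (k : Int) then (2 : Int) ^ ((f2 p.1 p.2).toNat) else 0)).sum := by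
  induction ps generalizing po with
  | nil => simp
  | cons p ps ih =>
    obtain ⟨hf0, hf1⟩ := hin p (List.mem_cons_self ..)
    have hins : ∀ q ∈ ps, 0 ≤ f1 q.1 q.2 ∧ f1 q.1 q.2 < (N : Int) := by
      intro q hq; exact hin q (List.mem_cons_of_mem _ hq)
    rw [List.foldl_cons, List.map_cons, List.sum_cons]
    by_cases hb : β p.1 p.2
    · have hlt : (f1 p.1 p.2).toNat < po.length := by omega
      have hshift : (1 : Int) <<< (f2 p.1 p.2).toNat = 2 ^ (f2 p.1 p.2).toNat := by
        simp [Int.shiftLeft_eq]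
      rw [if_pos hb, PySem.List.pySetD_of_nonneg _ _ hf0]
      rw [ih _ (by simpa using hpo) hins]
      have hget : ∀ (j : Nat) (hj : j < N),
          ((po.set (f1 p.1 p.2).toNat
            (PySem.List.pyGetD po (f1 p.1 p.2) 0 + (1 : Int) <<< (f2 p.1 p.2).toNat)).getD j 0)
          = if (f1 p.1 p.2).toNat = j then po.getD j 0 + 2 ^ (f2 p.1 p.2).toNat else po.getD j 0 := by
        intro j hj
        have hjlen : j < po.length := by omega
        rw [List.getD_eq_getElem _ _ (by simpa using hjlen), List.getD_eq_getElem _ _ hjlen]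
        rw [List.getElem_set]
        split
        · rename_i hij
          rw [PySem.List.pyGetD_of_nonneg _ _ hf0, hshift, hij,
              List.getD_eq_getElem _ _ hjlen]
        · rfl
      rw [hget k hk]
      by_cases hik : (f1 p.1 p.2).toNat = k
      · have : f1 p.1 p.2 = (k : Int) := by omega
        rw [if_pos hik, if_pos ⟨hb, this⟩]
        ring
      · have : ¬ (f1 p.1 p.2 = (k : Int)) := by omega
        rw [if_neg hik, if_neg (by tauto)]
        ring
    · rw [if_neg hb, ih _ hpo hins, if_neg (by tauto)]
      ring

-- A's inner mask loop, with its |= on always-fresh bits, is the corresponding sum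
theorem pvBorFoldSum (cond : Int → Prop) [instc : DecidablePred cond] (n : Nat) :
    0 ≤ ((PySem.List.pyRange 0 (n : Int) 1).map
          (fun b => if cond b then (2 : Int) ^ b.toNat else 0)).sum ∧
    ((PySem.List.pyRange 0 (n : Int) 1).map
          (fun b => if cond b then (2 : Int) ^ b.toNat else 0)).sum < 2 ^ n ∧
    (PySem.List.pyRange 0 (n : Int) 1).foldl
        (fun m b => if cond b then PySem.Int.bor m ((1 : Int) <<< b.toNat) else m) 0
      = ((PySem.List.pyRange 0 (n : Int) 1).map
          (fun b => if cond b then (2 : Int) ^ b.toNat else 0)).sum := by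
  induction n with
  | zero =>
    rw [PySem.List.pyRange_one_eq_nil (by simp)]
    simp
  | succ n ih =>
    obtain ⟨ih0, ih1, ih2⟩ := ih
    have hcast : ((n + 1 : Nat) : Int) = (n : Int) + 1 := by push_cast; ring
    have hsplit : PySem.List.pyRange 0 ((n + 1 : Nat) : Int) 1
        = PySem.List.pyRange 0 (n : Int) 1 ++ [(n : Int)] := by
      rw [hcast, PySem.List.pyRange_one_succ_right (by exact_mod_cast Int.natCast_nonneg n)]
    rw [hsplit]
    rw [List.map_append, List.sum_append, List.foldl_append, ih2]
    have htn : ((n : Int)).toNat = n := Int.toNat_natCast n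
    have hterm0 : (0 : Int) ≤ (if cond (n : Int) then (2 : Int) ^ ((n : Int)).toNat else 0) := by
      split <;> positivity
    have hterm1 : (if cond (n : Int) then (2 : Int) ^ ((n : Int)).toNat else 0) ≤ 2 ^ n := by
      rw [htn]
      split
      · exact le_refl _
      · positivity
    refine ⟨?_, ?_, ?_⟩
    · simp only [List.map_cons, List.map_nil, List.sum_cons, List.sum_nil, add_zero]
      exact add_nonneg ih0 hterm0
    · have : (2 : Int) ^ (n + 1) = 2 ^ n + 2 ^ n := by ring
      simp only [List.map_cons, List.map_nil, List.sum_cons, List.sum_nil, add_zero]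
      omega
    · simp only [List.map_cons, List.map_nil, List.sum_cons, List.sum_nil, add_zero,
        List.foldl_cons, List.foldl_nil]
      by_cases hc : cond (n : Int)
      · rw [if_pos hc, if_pos hc, htn,
            pvBorEqAdd _ n ih0 ih1]
        simp [Int.shiftLeft_eq]
      · rw [if_neg hc, if_neg hc]
        ring

-- pyRange-indexed list sums are Finset.range sums
theorem pvListSumRange (n : Nat) (f : Int → Int) :
    ((PySem.List.pyRange 0 (n : Int) 1).map f).sum = ∑ i ∈ Finset.range n, f (i : Int) := by
  rw [PySem.List.pyRange_one]
  have h1 : ((n : Int) - 0).toNat = n := by omega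
  rw [h1, List.map_map]
  have : (f ∘ fun k : Nat => (0 : Int) + (k : Int)) = fun k : Nat => f (k : Int) := by
    funext k; simp
  rw [this]
  rfl

-- the crux: re-indexing the scatter sum over source cells by the pull map gives
-- the gather sum over the output row's bits
theorem pvSumReindex (β : Int → Int → Prop) [inst : ∀ r c, Decidable (β r c)]
    (g1 g2 f1 f2 : Int → Int → Int) (Hn Wn Hon Won : Nat) (k : Nat) (hk : k < Hon)
    (hfwd : ∀ r c : Int, 0 ≤ r → r < (Hn : Int) → 0 ≤ c → c < (Wn : Int) →
      0 ≤ f1 r c ∧ f1 r c < (Hon : Int) ∧ 0 ≤ f2 r c ∧ f2 r c < (Won : Int) ∧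
      g1 (f1 r c) (f2 r c) = r ∧ g2 (f1 r c) (f2 r c) = c)
    (hpull : ∀ a b : Int, 0 ≤ a → a < (Hon : Int) → 0 ≤ b → b < (Won : Int) →
      0 ≤ g1 a b ∧ g1 a b < (Hn : Int) ∧ 0 ≤ g2 a b ∧ g2 a b < (Wn : Int) ∧
      f1 (g1 a b) (g2 a b) = a ∧ f2 (g1 a b) (g2 a b) = b) :
    (∑ r ∈ Finset.range Hn, ∑ c ∈ Finset.range Wn,
        (if β (r : Int) (c : Int) ∧ f1 (r : Int) (c : Int) = (k : Int)
         then (2 : Int) ^ ((f2 (r : Int) (c : Int)).toNat) else 0))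
    = ∑ b ∈ Finset.range Won,
        (if β (g1 (k : Int) (b : Int)) (g2 (k : Int) (b : Int)) then (2 : Int) ^ b else 0) := by
  rw [← Finset.sum_product']
  rw [← Finset.sum_filter (fun p : Nat × Nat => β (p.1 : Int) (p.2 : Int) ∧ f1 (p.1 : Int) (p.2 : Int) = (k : Int))
        (fun p : Nat × Nat => (2 : Int) ^ ((f2 (p.1 : Int) (p.2 : Int)).toNat))]
  rw [← Finset.sum_filter (fun b : Nat => β (g1 (k : Int) (b : Int)) (g2 (k : Int) (b : Int)))
        (fun b : Nat => (2 : Int) ^ b)]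
  refine Finset.sum_nbij' (fun p => (f2 (p.1 : Int) (p.2 : Int)).toNat)
    (fun b => ((g1 (k : Int) (b : Int)).toNat, (g2 (k : Int) (b : Int)).toNat)) ?_ ?_ ?_ ?_ ?_
  · intro p hp
    simp only [Finset.mem_filter, Finset.mem_product, Finset.mem_range] at hp
    obtain ⟨⟨hp1, hp2⟩, hb, hf⟩ := hp
    obtain ⟨c0, c1, c2, c3, c4, c5⟩ := hfwd (p.1 : Int) (p.2 : Int)
      (by positivity) (by exact_mod_cast hp1) (by positivity) (by exact_mod_cast hp2)
    simp only [Finset.mem_filter, Finset.mem_range]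
    constructor
    · omega
    · have e2 : ((f2 (p.1 : Int) (p.2 : Int)).toNat : Int) = f2 (p.1 : Int) (p.2 : Int) := by omega
      rw [e2, ← hf, c4, c5]
      exact hb
  · intro b hb
    simp only [Finset.mem_filter, Finset.mem_range] at hb
    obtain ⟨hb1, hb2⟩ := hb
    obtain ⟨d0, d1, d2, d3, d4, d5⟩ := hpull (k : Int) (b : Int)
      (by positivity) (by exact_mod_cast hk) (by positivity) (by exact_mod_cast hb1)
    simp only [Finset.mem_filter, Finset.mem_product, Finset.mem_range]
    have e1 : ((g1 (k : Int) (b : Int)).toNat : Int) = g1 (k : Int) (b : Int) := by omega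
    have e2 : ((g2 (k : Int) (b : Int)).toNat : Int) = g2 (k : Int) (b : Int) := by omega
    refine ⟨⟨by omega, by omega⟩, ?_, ?_⟩
    · rw [e1, e2]; exact hb2
    · rw [e1, e2, d4]
  · intro p hp
    simp only [Finset.mem_filter, Finset.mem_product, Finset.mem_range] at hp
    obtain ⟨⟨hp1, hp2⟩, hb, hf⟩ := hp
    obtain ⟨c0, c1, c2, c3, c4, c5⟩ := hfwd (p.1 : Int) (p.2 : Int)
      (by positivity) (by exact_mod_cast hp1) (by positivity) (by exact_mod_cast hp2)
    dsimp only
    have e2 : ((f2 (p.1 : Int) (p.2 : Int)).toNat : Int) = f2 (p.1 : Int) (p.2 : Int) := by omega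
    have hc4 : g1 (k : Int) ((f2 (p.1 : Int) (p.2 : Int)).toNat : Int) = (p.1 : Int) := by
      rw [e2, ← hf]; exact c4
    have hc5 : g2 (k : Int) ((f2 (p.1 : Int) (p.2 : Int)).toNat : Int) = (p.2 : Int) := by
      rw [e2, ← hf]; exact c5
    have : (p.1, p.2) = p := rfl
    rw [← this]
    simp only [Prod.mk.injEq]
    refine ⟨?_, ?_⟩
    · rw [hc4]; omega
    · rw [hc5]; omega
  · intro b hb
    simp only [Finset.mem_filter, Finset.mem_range] at hb
    obtain ⟨hb1, hb2⟩ := hb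
    obtain ⟨d0, d1, d2, d3, d4, d5⟩ := hpull (k : Int) (b : Int)
      (by positivity) (by exact_mod_cast hk) (by positivity) (by exact_mod_cast hb1)
    have e1 : ((g1 (k : Int) (b : Int)).toNat : Int) = g1 (k : Int) (b : Int) := by omega
    have e2 : ((g2 (k : Int) (b : Int)).toNat : Int) = g2 (k : Int) (b : Int) := by omega
    dsimp only
    rw [e1, e2, d5]
    omega
  · intro p hp
    simp only [Finset.mem_filter, Finset.mem_product, Finset.mem_range] at hp
    obtain ⟨⟨hp1, hp2⟩, hb, hf⟩ := hp
    rfl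

theorem pvFoldlId (l : List Int) (init : Int) : l.foldl (fun m _ => m) init = init := by
  induction l generalizing init with
  | nil => rfl
  | cons x xs ih => exact ih init

theorem pvMapZero {α : Type} (l : List α) : l.map (fun _ => (0 : Int)) = List.replicate l.length 0 := by
  induction l with
  | nil => rfl
  | cons x xs ih => simp [ih, List.replicate_succ]

theorem pvSumFlatMap {α : Type} (l : List α) (g : α → List Int) :
    (l.flatMap g).sum = (l.map (fun x => (g x).sum)).sum := by
  induction l with
  | nil => rfl
  | cons x xs ih => simp [List.flatMap_cons, List.sum_append, ih]

-- the generic equivalence: a scatter/push loop over the source grid along the forward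
-- map equals A's gather/pull loop over the output grid along the (inverse) pull map
theorem pvScatterEqGather (β : Int → Int → Prop) [inst : ∀ r c, Decidable (β r c)]
    (H W Ho Wo : Int) (g1 g2 f1 f2 : Int → Int → Int)
    (hdim : (Ho = H ∧ Wo = W) ∨ (Ho = W ∧ Wo = H))
    (hfwd : ∀ r c, 0 ≤ r → r < H → 0 ≤ c → c < W →
      0 ≤ f1 r c ∧ f1 r c < Ho ∧ 0 ≤ f2 r c ∧ f2 r c < Wo ∧
      g1 (f1 r c) (f2 r c) = r ∧ g2 (f1 r c) (f2 r c) = c)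
    (hpull : ∀ a b, 0 ≤ a → a < Ho → 0 ≤ b → b < Wo →
      0 ≤ g1 a b ∧ g1 a b < H ∧ 0 ≤ g2 a b ∧ g2 a b < W ∧
      f1 (g1 a b) (g2 a b) = a ∧ f2 (g1 a b) (g2 a b) = b) :
    (PySem.List.pyRange 0 H 1).foldl (fun po r =>
        (PySem.List.pyRange 0 W 1).foldl (fun po c =>
          if β r c then
            PySem.List.pySetD po (f1 r c)
              (PySem.List.pyGetD po (f1 r c) 0 + (1 : Int) <<< (f2 r c).toNat)
          else po) po) (PySem.List.pyRepeat [(0 : Int)] Ho)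
    = (PySem.List.pyRange 0 Ho 1).foldl (fun acc a =>
        acc ++ [(PySem.List.pyRange 0 Wo 1).foldl (fun m b =>
          if (0 ≤ g1 a b ∧ g1 a b < H) ∧ (0 ≤ g2 a b ∧ g2 a b < W) then
            if β (g1 a b) (g2 a b) then PySem.Int.bor m ((1 : Int) <<< b.toNat) else m
          else m) 0]) [] := by
  rw [pvFoldlNested, pvFoldlAppend, PySem.List.pyRepeat_singleton, List.nil_append]
  by_cases hHW : 0 < H ∧ 0 < W
  · -- main case: both grids are genuine; the forward map is a bijection between them
    obtain ⟨hH, hW⟩ := hHW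
    have hHo : 0 < Ho := by rcases hdim with ⟨h1, h2⟩ | ⟨h1, h2⟩ <;> omega
    have hWo : 0 < Wo := by rcases hdim with ⟨h1, h2⟩ | ⟨h1, h2⟩ <;> omega
    obtain ⟨Hn, rfl⟩ : ∃ n : Nat, H = (n : Int) := ⟨H.toNat, by omega⟩
    obtain ⟨Wn, rfl⟩ : ∃ n : Nat, W = (n : Int) := ⟨W.toNat, by omega⟩
    obtain ⟨Hon, rfl⟩ : ∃ n : Nat, Ho = (n : Int) := ⟨Ho.toNat, by omega⟩
    obtain ⟨Won, rfl⟩ : ∃ n : Nat, Wo = (n : Int) := ⟨Wo.toNat, by omega⟩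
    have hmem : ∀ p ∈ (PySem.List.pyRange 0 (Hn : Int) 1).flatMap
        (fun r => (PySem.List.pyRange 0 (Wn : Int) 1).map (fun c => (r, c))),
        0 ≤ p.1 ∧ p.1 < (Hn : Int) ∧ 0 ≤ p.2 ∧ p.2 < (Wn : Int) := by
      intro p hp
      simp only [List.mem_flatMap, List.mem_map] at hp
      obtain ⟨r, hr, c, hc, rfl⟩ := hp
      rw [PySem.List.mem_pyRange_one] at hr hc
      exact ⟨hr.1, hr.2, hc.1, hc.2⟩
    have hscatlen := pvScatterLen β f1 f2
      ((PySem.List.pyRange 0 (Hn : Int) 1).flatMap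
        (fun r => (PySem.List.pyRange 0 (Wn : Int) 1).map (fun c => (r, c))))
      (List.replicate ((Hon : Int)).toNat 0)
    apply List.ext_getElem
    · rw [hscatlen]
      simp [PySem.List.length_pyRange_one]
    · intro k h1 h2
      have hklen : k < Hon := by
        rw [hscatlen] at h1
        simpa using h1
      have hkHo : (k : Int) < (Hon : Int) := by omega
      -- left side: scatter characterisation
      rw [← List.getD_eq_getElem _ 0 h1]
      rw [pvScatterGetD β f1 f2 Hon _ _ (by simp) k hklen
        (by intro p hp; obtain ⟨a1, a2, a3, a4⟩ := hmem p hp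
            have := hfwd p.1 p.2 a1 a2 a3 a4
            omega)]
      rw [List.getD_replicate 0 (by omega)]
      rw [zero_add]
      -- right side: gather row k
      rw [List.getElem_map, PySem.List.getElem_pyRange_one, zero_add]
      -- drop the always-true bounds test in the gather loop
      have hextr : ∀ (m : Int), ∀ b ∈ PySem.List.pyRange 0 (Won : Int) 1,
          (if (0 ≤ g1 (k : Int) b ∧ g1 (k : Int) b < (Hn : Int)) ∧ (0 ≤ g2 (k : Int) b ∧ g2 (k : Int) b < (Wn : Int)) then
            if β (g1 (k : Int) b) (g2 (k : Int) b) then PySem.Int.bor m ((1 : Int) <<< b.toNat) else m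
          else m)
          = (if β (g1 (k : Int) b) (g2 (k : Int) b) then PySem.Int.bor m ((1 : Int) <<< b.toNat) else m) := by
        intro m b hb
        rw [PySem.List.mem_pyRange_one] at hb
        obtain ⟨d0, d1, d2, d3, d4, d5⟩ := hpull (k : Int) b (by omega) hkHo hb.1 hb.2
        rw [if_pos ⟨⟨d0, d1⟩, ⟨d2, d3⟩⟩]
      rw [List.foldl_ext _ _ 0 hextr]
      -- gather fold = gather sum
      rw [(pvBorFoldSum (fun b => β (g1 (k : Int) b) (g2 (k : Int) b)) Won).2.2]
      rw [pvListSumRange]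
      -- scatter sum = double sum
      rw [List.map_flatMap]
      rw [pvSumFlatMap]
      rw [pvListSumRange]
      have hinner : ∀ r : Int,
          ((fun x => (((PySem.List.pyRange 0 (Wn : Int) 1).map (fun c => (x, c))).map
            (fun p : Int × Int => if β p.1 p.2 ∧ f1 p.1 p.2 = (k : Int)
              then (2 : Int) ^ ((f2 p.1 p.2).toNat) else 0)).sum) r)
          = ∑ c ∈ Finset.range Wn,
              (if β r (c : Int) ∧ f1 r (c : Int) = (k : Int)
               then (2 : Int) ^ ((f2 r (c : Int)).toNat) else 0) := by
        intro r
        dsimp only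
        rw [List.map_map]
        have hco : ((fun p : Int × Int => if β p.1 p.2 ∧ f1 p.1 p.2 = (k : Int)
              then (2 : Int) ^ ((f2 p.1 p.2).toNat) else 0) ∘ fun c => (r, c))
            = fun c : Int => if β r c ∧ f1 r c = (k : Int)
              then (2 : Int) ^ ((f2 r c).toNat) else 0 := by
          funext c; rfl
        rw [hco, pvListSumRange]
      have hsum2 := Finset.sum_congr (rfl : Finset.range Hn = Finset.range Hn)
        (fun r _ => hinner (r : Int))
      rw [hsum2]
      -- re-index by the bijection
      rw [pvSumReindex β g1 g2 f1 f2 Hn Wn Hon Won k hklen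
        (by intro r c b0 b1 b2 b3; exact hfwd r c b0 b1 b2 b3)
        (by intro a b b0 b1 b2 b3; exact hpull a b b0 b1 b2 b3)]
      refine Finset.sum_congr rfl ?_
      intro b _
      rw [Int.toNat_natCast]
  · -- degenerate case: no source cells, and every gather bounds test fails
    have hP : (PySem.List.pyRange 0 H 1).flatMap
        (fun r => (PySem.List.pyRange 0 W 1).map (fun c => (r, c))) = [] := by
      rcases not_and_or.mp hHW with h | h
      · rw [PySem.List.pyRange_one_eq_nil (show H ≤ 0 by omega)]
        rfl
      · simp only [PySem.List.pyRange_one_eq_nil (show W ≤ (0 : Int) by omega), List.map_nil]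
        simp
    rw [hP, List.foldl_nil]
    have hmask : ∀ a : Int,
        (PySem.List.pyRange 0 Wo 1).foldl (fun m b =>
          if (0 ≤ g1 a b ∧ g1 a b < H) ∧ (0 ≤ g2 a b ∧ g2 a b < W) then
            if β (g1 a b) (g2 a b) then PySem.Int.bor m ((1 : Int) <<< b.toNat) else m
          else m) 0 = 0 := by
      intro a
      have hfun : ∀ (m : Int), ∀ b ∈ PySem.List.pyRange 0 Wo 1,
          (if (0 ≤ g1 a b ∧ g1 a b < H) ∧ (0 ≤ g2 a b ∧ g2 a b < W) then
            if β (g1 a b) (g2 a b) then PySem.Int.bor m ((1 : Int) <<< b.toNat) else m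
          else m) = m := by
        intro m b _
        rw [if_neg]
        rcases not_and_or.mp hHW with h | h
        · rintro ⟨⟨u1, u2⟩, _⟩; omega
        · rintro ⟨_, ⟨u1, u2⟩⟩; omega
      rw [List.foldl_ext _ _ 0 hfun, pvFoldlId]
    have : (PySem.List.pyRange 0 Ho 1).map (fun a =>
        (PySem.List.pyRange 0 Wo 1).foldl (fun m b =>
          if (0 ≤ g1 a b ∧ g1 a b < H) ∧ (0 ≤ g2 a b ∧ g2 a b < W) then
            if β (g1 a b) (g2 a b) then PySem.Int.bor m ((1 : Int) <<< b.toNat) else m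
          else m) 0)
        = (PySem.List.pyRange 0 Ho 1).map (fun _ => (0 : Int)) :=
      List.map_congr_left (fun a _ => hmask a)
    rw [this, pvMapZero]
    simp [PySem.List.length_pyRange_one]

theorem pose_plane_spec : Claim_equal_pose_plane := by
  intro plane pid H W _ hpre
  unfold Spec_pose_plane
  obtain ⟨hpid, _⟩ := hpre
  simp only [pvPoseIds, List.mem_cons, List.not_mem_nil, or_false] at hpid
  rcases hpid with rfl | rfl | rfl | rfl | rfl | rfl | rfl | rfl
  · -- pid = "I"
    unfold pose_plane pose_plane_alt
    simp only [pvPoseIds, List.mem_cons, List.not_mem_nil, or_false, String.reduceEq, or_true,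
      if_true, if_false, Prod.mk.injEq]
    refine ⟨?_, trivial⟩
    exact (pvScatterEqGather (fun r c => pvBit (PySem.List.pyGetD plane r 0) c ≠ 0)
      H W H W (fun a b => a) (fun a b => b) (fun r c => r) (fun r c => c)
      (Or.inl ⟨rfl, rfl⟩)
      (by intro r c h0 h1 h2 h3
          dsimp only
          exact ⟨by omega, by omega, by omega, by omega, by omega, by omega⟩)
      (by intro a b h0 h1 h2 h3
          dsimp only
          exact ⟨by omega, by omega, by omega, by omega, by omega, by omega⟩)).symm
  · -- pid = "R90"
    unfold pose_plane pose_plane_alt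
    simp only [pvPoseIds, List.mem_cons, List.not_mem_nil, or_false, String.reduceEq, or_true,
      if_true, if_false, Prod.mk.injEq]
    refine ⟨?_, trivial⟩
    exact (pvScatterEqGather (fun r c => pvBit (PySem.List.pyGetD plane r 0) c ≠ 0)
      H W W H (fun a b => H - 1 - b) (fun a b => a) (fun r c => c) (fun r c => H - 1 - r)
      (Or.inr ⟨rfl, rfl⟩)
      (by intro r c h0 h1 h2 h3
          dsimp only
          exact ⟨by omega, by omega, by omega, by omega, by omega, by omega⟩)
      (by intro a b h0 h1 h2 h3
          dsimp only
          exact ⟨by omega, by omega, by omega, by omega, by omega, by omega⟩)).symm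
  · -- pid = "R180"
    unfold pose_plane pose_plane_alt
    simp only [pvPoseIds, List.mem_cons, List.not_mem_nil, or_false, String.reduceEq, or_true,
      if_true, if_false, Prod.mk.injEq]
    refine ⟨?_, trivial⟩
    exact (pvScatterEqGather (fun r c => pvBit (PySem.List.pyGetD plane r 0) c ≠ 0)
      H W H W (fun a b => H - 1 - a) (fun a b => W - 1 - b) (fun r c => H - 1 - r) (fun r c => W - 1 - c)
      (Or.inl ⟨rfl, rfl⟩)
      (by intro r c h0 h1 h2 h3
          dsimp only
          exact ⟨by omega, by omega, by omega, by omega, by omega, by omega⟩)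
      (by intro a b h0 h1 h2 h3
          dsimp only
          exact ⟨by omega, by omega, by omega, by omega, by omega, by omega⟩)).symm
  · -- pid = "R270"
    unfold pose_plane pose_plane_alt
    simp only [pvPoseIds, List.mem_cons, List.not_mem_nil, or_false, String.reduceEq, or_true,
      if_true, if_false, Prod.mk.injEq]
    refine ⟨?_, trivial⟩
    exact (pvScatterEqGather (fun r c => pvBit (PySem.List.pyGetD plane r 0) c ≠ 0)
      H W W H (fun a b => b) (fun a b => W - 1 - a) (fun r c => W - 1 - c) (fun r c => r)
      (Or.inr ⟨rfl, rfl⟩)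
      (by intro r c h0 h1 h2 h3
          dsimp only
          exact ⟨by omega, by omega, by omega, by omega, by omega, by omega⟩)
      (by intro a b h0 h1 h2 h3
          dsimp only
          exact ⟨by omega, by omega, by omega, by omega, by omega, by omega⟩)).symm
  · -- pid = "FX"
    unfold pose_plane pose_plane_alt
    simp only [pvPoseIds, List.mem_cons, List.not_mem_nil, or_false, String.reduceEq, or_true,
      if_true, if_false, Prod.mk.injEq]
    refine ⟨?_, trivial⟩
    exact (pvScatterEqGather (fun r c => pvBit (PySem.List.pyGetD plane r 0) c ≠ 0)
      H W H W (fun a b => a) (fun a b => W - 1 - b) (fun r c => r) (fun r c => W - 1 - c)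
      (Or.inl ⟨rfl, rfl⟩)
      (by intro r c h0 h1 h2 h3
          dsimp only
          exact ⟨by omega, by omega, by omega, by omega, by omega, by omega⟩)
      (by intro a b h0 h1 h2 h3
          dsimp only
          exact ⟨by omega, by omega, by omega, by omega, by omega, by omega⟩)).symm
  · -- pid = "FXR90"
    unfold pose_plane pose_plane_alt
    simp only [pvPoseIds, List.mem_cons, List.not_mem_nil, or_false, String.reduceEq, or_true,
      if_true, if_false, Prod.mk.injEq]
    refine ⟨?_, trivial⟩
    exact (pvScatterEqGather (fun r c => pvBit (PySem.List.pyGetD plane r 0) c ≠ 0)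
      H W W H (fun a b => H - 1 - b) (fun a b => W - 1 - a) (fun r c => W - 1 - c) (fun r c => H - 1 - r)
      (Or.inr ⟨rfl, rfl⟩)
      (by intro r c h0 h1 h2 h3
          dsimp only
          exact ⟨by omega, by omega, by omega, by omega, by omega, by omega⟩)
      (by intro a b h0 h1 h2 h3
          dsimp only
          exact ⟨by omega, by omega, by omega, by omega, by omega, by omega⟩)).symm
  · -- pid = "FXR180"
    unfold pose_plane pose_plane_alt
    simp only [pvPoseIds, List.mem_cons, List.not_mem_nil, or_false, String.reduceEq, or_true,
      if_true, if_false, Prod.mk.injEq]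
    refine ⟨?_, trivial⟩
    exact (pvScatterEqGather (fun r c => pvBit (PySem.List.pyGetD plane r 0) c ≠ 0)
      H W H W (fun a b => H - 1 - a) (fun a b => b) (fun r c => H - 1 - r) (fun r c => c)
      (Or.inl ⟨rfl, rfl⟩)
      (by intro r c h0 h1 h2 h3
          dsimp only
          exact ⟨by omega, by omega, by omega, by omega, by omega, by omega⟩)
      (by intro a b h0 h1 h2 h3
          dsimp only
          exact ⟨by omega, by omega, by omega, by omega, by omega, by omega⟩)).symm
  · -- pid = "FXR270"
    unfold pose_plane pose_plane_alt
    simp only [pvPoseIds, List.mem_cons, List.not_mem_nil, or_false, String.reduceEq, or_true,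
      if_true, if_false, Prod.mk.injEq]
    refine ⟨?_, trivial⟩
    exact (pvScatterEqGather (fun r c => pvBit (PySem.List.pyGetD plane r 0) c ≠ 0)
      H W W H (fun a b => b) (fun a b => a) (fun r c => c) (fun r c => r)
      (Or.inr ⟨rfl, rfl⟩)
      (by intro r c h0 h1 h2 h3
          dsimp only
          exact ⟨by omega, by omega, by omega, by omega, by omega, by omega⟩)
      (by intro a b h0 h1 h2 h3
          dsimp only
          exact ⟨by omega, by omega, by omega, by omega, by omega, by omega⟩)).symm
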